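-- pv_equiv track=rewrite | github.com/LuisFilipe163/Python | Introdução a Computação - UFRJ/Laboratorio 9 parte 2.py | MxN
-- ===== SOURCE A (Python) =====
-- def MxN(matriz,numero):
--     resultado=[]
--     c=list.copy(matriz)
--     for i in range(len(matriz)):
--         for j in range(len(matriz[i])):
--             resultado=resultado+[matriz[i][j]*numero]
--             for k in range(len(resultado)):
--                 c[i][j]=resultado[k]
--     return c
-- ===== SOURCE B (Python) =====
-- def MxN(matriz, numero):
--     return [[x * numero for x in row] for row in matriz]
-- ===== Notes on version B (the rewrite author's own statement) =====
-- stated objective: faster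
-- what changed: A rebuilds 'resultado' by list concatenation and rescans it to reassign c[i][j] once per element so far; B assigns each product once via a nested comprehension. (A also mutates matriz's rows in place through a shallow copy; B leaves matriz untouched -- the claim is about the return value.)
import Mathlib
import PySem

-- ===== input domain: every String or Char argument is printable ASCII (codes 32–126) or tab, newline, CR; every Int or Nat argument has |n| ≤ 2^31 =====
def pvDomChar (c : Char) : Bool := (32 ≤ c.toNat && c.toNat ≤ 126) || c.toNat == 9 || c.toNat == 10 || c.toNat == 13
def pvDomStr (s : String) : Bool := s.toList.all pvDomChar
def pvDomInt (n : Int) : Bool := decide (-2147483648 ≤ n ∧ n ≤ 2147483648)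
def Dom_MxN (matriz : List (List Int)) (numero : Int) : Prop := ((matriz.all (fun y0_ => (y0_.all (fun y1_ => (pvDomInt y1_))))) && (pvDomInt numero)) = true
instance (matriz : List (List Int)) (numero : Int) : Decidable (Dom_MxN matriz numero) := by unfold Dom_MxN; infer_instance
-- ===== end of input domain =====

-- B drops A's quadratic 'resultado' rebuilding and the redundant rescan loop, assigning each product once (faster).
-- Note: Python A mutates matriz's rows in place (list.copy is shallow); B does not. The claim is about the return value.

-- ===== PORT A =====
-- In A, 'c = list.copy(matriz)' shares the row lists with 'matriz', so the write 'c[i][j] = …'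
-- and the read 'matriz[i][j]' touch the same row objects: the port models both by one matrix.
-- inner 'for k in range(len(resultado)): c[i][j] = resultado[k]'
def MxN_kloop (i j : Nat) (resultado : List Int) (c : List (List Int)) : List (List Int) :=
  (List.range resultado.length).foldl
    (fun c2 k => c2.set i ((c2.getD i []).set j (resultado.getD k 0))) c

-- body of 'for j in range(len(matriz[i]))', state = (resultado, c)
def MxN_jstep (numero : Int) (i : Nat) (st2 : List Int × List (List Int)) (j : Nat) :
    List Int × List (List Int) :=
  let resultado := st2.1 ++ [((st2.2.getD i []).getD j 0) * numero]
  (resultado, MxN_kloop i j resultado st2.2)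

-- body of 'for i in range(len(matriz))'
def MxN_istep (numero : Int) (st : List Int × List (List Int)) (i : Nat) :
    List Int × List (List Int) :=
  (List.range ((st.2.getD i []).length)).foldl (MxN_jstep numero i) st

def MxN (matriz : List (List Int)) (numero : Int) : List (List Int) :=
  ((List.range matriz.length).foldl (MxN_istep numero) ([], matriz)).2

-- ===== PORT B =====
def MxN_alt (matriz : List (List Int)) (numero : Int) : List (List Int) :=
  matriz.map (fun row => row.map (fun x => x * numero))

-- ===== PRECONDITION & SPEC =====
def Spec_MxN (matriz : List (List Int)) (numero : Int) (out : List (List Int)) : Prop := out = MxN_alt matriz numero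
instance (matriz : List (List Int)) (numero : Int) (out : List (List Int)) : Decidable (Spec_MxN matriz numero out) := by unfold Spec_MxN; infer_instance

-- ===== CLAIM (what is proved, stated in full; the proofs are below) =====
def Claim_equal_MxN : Prop := ∀ (matriz : List (List Int)) (numero : Int), Dom_MxN matriz numero → Spec_MxN matriz numero (MxN matriz numero)

-- ===== LEMMAS AND PROOFS =====


lemma getD_set_self (c : List (List Int)) (i : Nat) (hi : i < c.length) (r : List Int) :
    (c.set i r).getD i [] = r := by
  rw [List.getD_eq_getElem _ [] (by simpa using hi)]; simp

-- writing twice at the same (i,j) keeps only the second value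
lemma write_write (i j : Nat) (c : List (List Int)) (x y : Int) :
    ((c.set i ((c.getD i []).set j x)).set i
      (((c.set i ((c.getD i []).set j x)).getD i []).set j y))
    = c.set i ((c.getD i []).set j y) := by
  by_cases hi : i < c.length
  · rw [getD_set_self c i hi, List.set_set, List.set_set]
  · have h0 : ∀ r : List Int, c.set i r = c :=
      fun r => List.set_eq_of_length_le (by omega)
    simp only [h0]


lemma fold_write_range (i j : Nat) (v : Nat → Int) (n : Nat) (c : List (List Int)) :
    (List.range (n+1)).foldl
      (fun c2 k => c2.set i ((c2.getD i []).set j (v k))) c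
    = c.set i ((c.getD i []).set j (v n)) := by
  induction n generalizing c with
  | zero => simp [List.range_succ]
  | succ n ih =>
      rw [List.range_succ, List.foldl_append, ih]
      simpa using write_write i j c (v n) (v (n+1))

-- the k-loop collapses to a single write of the last element
lemma kloop_eq (i j : Nat) (res0 : List Int) (x : Int) (c : List (List Int)) :
    MxN_kloop i j (res0 ++ [x]) c = c.set i ((c.getD i []).set j x) := by
  unfold MxN_kloop
  have hl : (res0 ++ [x]).length = res0.length + 1 := by simp
  rw [hl, fold_write_range i j (fun k => (res0 ++ [x]).getD k 0) res0.length c]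
  congr 2
  simp [List.getD]


-- the j-loop scales row i in place and appends the scaled row to resultado
lemma jloop_eq (numero : Int) (i : Nat) (c : List (List Int)) (hi : i < c.length)
    (r : List Int) (hr : c.getD i [] = r) (res0 : List Int) (j : Nat) (hj : j ≤ r.length) :
    (List.range j).foldl (MxN_jstep numero i) (res0, c)
      = (res0 ++ (r.take j).map (fun x => x * numero),
         c.set i ((r.take j).map (fun x => x * numero) ++ r.drop j)) := by
  induction j with
  | zero =>
      simp only [List.range_zero, List.foldl_nil, List.take_zero, List.map_nil,
        List.nil_append, List.append_nil, List.drop_zero]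
      rw [← hr, List.getD_eq_getElem c [] hi, List.set_getElem_self hi]
  | succ j ih =>
      have hjlt : j < r.length := by omega
      rw [List.range_succ, List.foldl_append, ih (by omega), List.foldl_cons, List.foldl_nil]
      have hA : ((r.take j).map (fun x => x * numero)).length = j := by
        simp [Nat.min_eq_left (le_of_lt hjlt)]
      have hget : (((r.take j).map (fun x => x * numero)) ++ r.drop j).getD j 0 = r[j] := by
        rw [List.getD, List.getElem?_append_right (by omega)]
        simp [List.getElem?_drop, Nat.min_eq_left (le_of_lt hjlt), List.getElem?_eq_getElem hjlt]
      have hres : (res0 ++ (r.take j).map (fun x => x * numero)) ++ [r[j] * numero]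
          = res0 ++ (r.take (j+1)).map (fun x => x * numero) := by
        rw [List.take_add_one, List.getElem?_eq_getElem hjlt]
        simp only [Option.toList_some, List.map_append, List.map_cons, List.map_nil,
          List.append_assoc]
      have hset : (((r.take j).map (fun x => x * numero)) ++ r.drop j).set j (r[j] * numero)
          = (r.take (j+1)).map (fun x => x * numero) ++ r.drop (j+1) := by
        rw [List.set_append_right _ _ (by omega), hA, Nat.sub_self,
          List.drop_eq_getElem_cons hjlt, List.set_cons_zero,
          List.take_add_one, List.getElem?_eq_getElem hjlt]
        simp only [Option.toList_some, List.map_append, List.map_cons, List.map_nil,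
          List.append_assoc, List.singleton_append]
      simp only [MxN_jstep, getD_set_self c i hi]
      rw [hget, kloop_eq, getD_set_self c i hi, List.set_set, hres, hset]

lemma outer_eq (numero : Int) (matriz : List (List Int)) (i : Nat) (hi : i ≤ matriz.length) :
    ((List.range i).foldl (MxN_istep numero) ([], matriz)).2
      = (matriz.take i).map (fun row => row.map (fun x => x * numero)) ++ matriz.drop i := by
  induction i with
  | zero => simp
  | succ i ih =>
      have hilt : i < matriz.length := by omega
      rw [List.range_succ, List.foldl_append, List.foldl_cons, List.foldl_nil]
      set st := (List.range i).foldl (MxN_istep numero) ([], matriz) with hst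
      have h2 : st.2 = (matriz.take i).map (fun row => row.map (fun x => x * numero))
          ++ matriz.drop i := ih (by omega)
      have hA : ((matriz.take i).map (fun row => row.map (fun x => x * numero))).length = i := by
        simp [Nat.min_eq_left (le_of_lt hilt)]
      have hlen : i < st.2.length := by
        rw [h2]; simp; omega
      have hget : st.2.getD i [] = matriz[i] := by
        rw [h2, List.getD, List.getElem?_append_right (by omega)]
        simp [List.getElem?_drop, Nat.min_eq_left (le_of_lt hilt), List.getElem?_eq_getElem hilt]
      unfold MxN_istep
      rw [hget]
      have := jloop_eq numero i st.2 hlen matriz[i] hget st.1 matriz[i].length le_rfl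
      rw [show st = (st.1, st.2) from rfl] at this ⊢
      rw [this]
      simp only [List.take_length, List.drop_length, List.append_nil]
      rw [h2, List.set_append_right _ _ (by omega), hA, Nat.sub_self,
        List.drop_eq_getElem_cons hilt, List.set_cons_zero,
        List.take_add_one, List.getElem?_eq_getElem hilt]
      simp only [Option.toList_some, List.map_append, List.map_cons, List.map_nil,
        List.append_assoc, List.singleton_append]

-- ===== VERDICT (by name: the statement is the Claim_ definition above) =====
theorem MxN_spec : Claim_equal_MxN := by
  intro matriz numero _
  unfold Spec_MxN MxN MxN_alt
  rw [outer_eq numero matriz matriz.length le_rfl]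
  simp
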